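-- pv_equiv track=rewrite | github.com/Cezarovsky/ai-cosmic-garden | Lumen/memory_system/lumen_memory.py | _chunk_conversation
-- ===== SOURCE A (Python) =====
-- from typing import List, Dict, Optional, Tuple
--
-- def _chunk_conversation(text: str, chunk_size: int = 500) -> List[str]:
--     """Împarte conversația în chunks pentru embeddings."""
--     paragraphs = text.split('\n\n')
--     chunks = []
--     current_chunk = ""
--
--     for para in paragraphs:
--         if len(current_chunk) + len(para) < chunk_size:
--             current_chunk += para + "\n\n"
--         else:
--             if current_chunk:
--                 chunks.append(current_chunk.strip())
--             current_chunk = para + "\n\n"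
--
--     if current_chunk:
--         chunks.append(current_chunk.strip())
--
--     return chunks
-- ===== SOURCE B (Python) =====
-- def _chunk_conversation(text: str, chunk_size: int = 500):
--     """Recursive decomposition: peel off one maximal paragraph group at a time
--     (outer recursion per chunk, inner scan consuming paragraphs), then render
--     each group with a single blank-line join + strip."""
--     def split_groups(paras):
--         if not paras:
--             return []
--         k = 1
--         acc = len(paras[0]) + 2
--         while k < len(paras) and acc + len(paras[k]) < chunk_size:
--             acc += len(paras[k]) + 2
--             k += 1
--         return [paras[:k]] + split_groups(paras[k:])
--     return ['\n\n'.join(g).strip() for g in split_groups(text.split('\n\n'))]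
-- ===== Notes on version B (the rewrite author's own statement) =====
-- stated objective: alternative
-- what changed: B replaces A's single paragraph-by-paragraph fold with flush logic by a recursive chunk-at-a-time decomposition: a recursive splitter peels off one maximal group of paragraphs per call (inner scan with integer length bookkeeping), and a final comprehension renders each group with one join+strip; A never materialises groups and interleaves string concatenation with flushing.
import Mathlib
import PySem

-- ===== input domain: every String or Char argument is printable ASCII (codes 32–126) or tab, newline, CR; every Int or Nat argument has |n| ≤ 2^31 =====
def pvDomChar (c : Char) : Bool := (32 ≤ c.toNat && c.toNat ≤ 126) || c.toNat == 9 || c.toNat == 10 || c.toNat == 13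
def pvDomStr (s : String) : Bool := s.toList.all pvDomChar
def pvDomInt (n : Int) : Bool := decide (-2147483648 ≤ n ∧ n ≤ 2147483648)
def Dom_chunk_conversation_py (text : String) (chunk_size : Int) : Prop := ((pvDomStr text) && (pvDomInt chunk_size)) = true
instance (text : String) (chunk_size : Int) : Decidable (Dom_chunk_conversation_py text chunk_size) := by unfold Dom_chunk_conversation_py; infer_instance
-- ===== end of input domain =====

-- B replaces A's single fold-with-flush by a recursive chunk-at-a-time splitter
-- (peel one maximal paragraph group per call) plus a rendering map; same cost.

-- ===== PORT A =====
-- loop body of A: grow the current chunk string, or flush it and restart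
def pvStepA (chunk_size : Int) (st : List String × List Char) (para : List Char) :
    List String × List Char :=
  if PySem.Chars.len st.2 + PySem.Chars.len para < chunk_size then
    (st.1, st.2 ++ para ++ ['\n', '\n'])
  else
    ((if st.2 ≠ [] then st.1 ++ [String.ofList (PySem.Chars.strip st.2)] else st.1),
      para ++ ['\n', '\n'])

def chunk_conversation_py (text : String) (chunk_size : Int) : List String :=
  let paragraphs := PySem.Chars.splitOn text.toList ['\n', '\n']
  let st := paragraphs.foldl (pvStepA chunk_size) ([], [])
  if st.2 ≠ [] then st.1 ++ [String.ofList (PySem.Chars.strip st.2)] else st.1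

-- ===== PORT B =====
-- B's inner scan: consume further paragraphs into the group while running length fits
def pvTakeGroup (cs : Int) (acc : Int) : List (List Char) → List (List Char) × List (List Char)
  | [] => ([], [])
  | p :: ps =>
    if acc + PySem.Chars.len p < cs then
      let r := pvTakeGroup cs (acc + PySem.Chars.len p + 2) ps
      (p :: r.1, r.2)
    else ([], p :: ps)

-- needed by pvSplitGroups for termination
theorem pvTakeGroup_length (cs acc : Int) (ps : List (List Char)) :
    (pvTakeGroup cs acc ps).2.length ≤ ps.length := by
  induction ps generalizing acc with
  | nil => simp [pvTakeGroup]
  | cons p ps ih =>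
    simp only [pvTakeGroup]
    split
    · exact Nat.le_succ_of_le (ih _)
    · simp

-- B's outer recursion: peel off one maximal group per call
def pvSplitGroups (cs : Int) : List (List Char) → List (List (List Char))
  | [] => []
  | p :: ps =>
    let r := pvTakeGroup cs (PySem.Chars.len p + 2) ps
    (p :: r.1) :: pvSplitGroups cs r.2
  termination_by l => l.length
  decreasing_by exact Nat.lt_succ_of_le (pvTakeGroup_length _ _ _)

-- "\n\n".join(g).strip()
def pvRender (g : List (List Char)) : String :=
  String.ofList (PySem.Chars.strip (PySem.Chars.join ['\n', '\n'] g))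

def chunk_conversation_py_alt (text : String) (chunk_size : Int) : List String :=
  (pvSplitGroups chunk_size (PySem.Chars.splitOn text.toList ['\n', '\n'])).map pvRender

-- ===== PRECONDITION & SPEC =====
def Spec_chunk_conversation_py (text : String) (chunk_size : Int) (out : List String) : Prop := out = chunk_conversation_py_alt text chunk_size
instance (text : String) (chunk_size : Int) (out : List String) : Decidable (Spec_chunk_conversation_py text chunk_size out) := by unfold Spec_chunk_conversation_py; infer_instance

-- ===== CLAIM (what is proved, stated in full; the proofs are below) =====
def Claim_equal_chunk_conversation_py : Prop := ∀ (text : String) (chunk_size : Int), Dom_chunk_conversation_py text chunk_size → Spec_chunk_conversation_py text chunk_size (chunk_conversation_py text chunk_size)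

-- ===== LEMMAS AND PROOFS =====

-- A's current_chunk string, reconstructed from the current group of paragraphs
def pvFlat (g : List (List Char)) : List Char := (g.map (· ++ ['\n', '\n'])).flatten

theorem pvFlat_append (g : List (List Char)) (p : List Char) :
    pvFlat (g ++ [p]) = pvFlat g ++ (p ++ ['\n', '\n']) := by
  simp [pvFlat]

theorem pvFlat_eq_nil_iff (g : List (List Char)) : pvFlat g = [] ↔ g = [] := by
  cases g with
  | nil => simp [pvFlat]
  | cons p ps => simp [pvFlat]

theorem pvRstrip_append_sep (x : List Char) :
    PySem.Chars.rstrip (x ++ ['\n', '\n']) = PySem.Chars.rstrip x := by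
  have h : PySem.Chars.isspace '\n' = true := by decide
  simp [PySem.Chars.rstrip, List.dropWhile, h]

theorem pvStrip_append_sep (x : List Char) :
    PySem.Chars.strip (x ++ ['\n', '\n']) = PySem.Chars.strip x := by
  simp only [PySem.Chars.strip, PySem.Chars.lstrip, List.dropWhile_append]
  by_cases h : (List.dropWhile PySem.Chars.isspace x).isEmpty = true
  · simp [h]
    rw [List.isEmpty_iff] at h
    rw [h]
    decide
  · simp [h, pvRstrip_append_sep]

theorem pvFlat_eq_join (g : List (List Char)) (hg : g ≠ []) :
    pvFlat g = PySem.Chars.join ['\n', '\n'] g ++ ['\n', '\n'] := by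
  induction g with
  | nil => exact absurd rfl hg
  | cons p ps ih =>
    cases ps with
    | nil => simp [pvFlat, PySem.Chars.join_singleton]
    | cons q r =>
      have := ih (by simp)
      simp only [pvFlat, List.map_cons, List.flatten_cons] at this ⊢
      rw [this, PySem.Chars.join_cons_cons]
      simp

theorem pvStrip_flat (g : List (List Char)) (hg : g ≠ []) :
    String.ofList (PySem.Chars.strip (pvFlat g)) = pvRender g := by
  rw [pvFlat_eq_join g hg, pvRender, pvStrip_append_sep]

-- finishing step of A's loop
def pvFinishA (st : List String × List Char) : List String :=
  if st.2 ≠ [] then st.1 ++ [String.ofList (PySem.Chars.strip st.2)] else st.1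

theorem pvLen_flat_append (g : List (List Char)) (p : List Char) :
    PySem.Chars.len (pvFlat (g ++ [p]))
      = PySem.Chars.len (pvFlat g) + PySem.Chars.len p + 2 := by
  rw [pvFlat_append]; simp [PySem.Chars.len_eq]; ring

-- unfolding equations for pvSplitGroups (well-founded recursion)
theorem pvSplitGroups_nil (cs : Int) : pvSplitGroups cs [] = [] := by
  rw [pvSplitGroups.eq_def]

theorem pvSplitGroups_cons (cs : Int) (p : List Char) (ps : List (List Char)) :
    pvSplitGroups cs (p :: ps)
      = (p :: (pvTakeGroup cs (PySem.Chars.len p + 2) ps).1)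
        :: pvSplitGroups cs (pvTakeGroup cs (PySem.Chars.len p + 2) ps).2 := by
  rw [pvSplitGroups.eq_def]

-- core invariant: from a nonempty current group, A's remaining fold produces exactly
-- the already-emitted chunks followed by B's groups (current group extended by
-- pvTakeGroup, then pvSplitGroups on the rest), each rendered by join+strip.
theorem pvLoopA_eq (cs : Int) (ps : List (List Char)) (chunks : List String)
    (gcur : List (List Char)) (hg : gcur ≠ []) :
    pvFinishA (ps.foldl (pvStepA cs) (chunks, pvFlat gcur))
      = chunks ++
        ((gcur ++ (pvTakeGroup cs (PySem.Chars.len (pvFlat gcur)) ps).1)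
          :: pvSplitGroups cs (pvTakeGroup cs (PySem.Chars.len (pvFlat gcur)) ps).2).map pvRender := by
  induction ps generalizing chunks gcur with
  | nil =>
    have hf : pvFlat gcur ≠ [] := fun hc => hg ((pvFlat_eq_nil_iff gcur).mp hc)
    simp [pvFinishA, pvTakeGroup, pvSplitGroups_nil, hf, pvStrip_flat gcur hg]
  | cons p ps ih =>
    by_cases hc : ((pvFlat gcur).length : Int) + (p.length : Int) < cs
    · have hA : pvStepA cs (chunks, pvFlat gcur) p = (chunks, pvFlat (gcur ++ [p])) := by
        simp [pvStepA, PySem.Chars.len_eq, hc, pvFlat_append]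
      have hT : pvTakeGroup cs (PySem.Chars.len (pvFlat gcur)) (p :: ps)
          = ((p :: (pvTakeGroup cs (PySem.Chars.len (pvFlat (gcur ++ [p]))) ps).1),
             (pvTakeGroup cs (PySem.Chars.len (pvFlat (gcur ++ [p]))) ps).2) := by
        have hl2 : ((pvFlat (gcur ++ [p])).length : Int)
            = ((pvFlat gcur).length : Int) + (p.length : Int) + 2 := by
          simpa [PySem.Chars.len_eq] using pvLen_flat_append gcur p
        simp [pvTakeGroup, PySem.Chars.len_eq, hc, hl2]
      rw [List.foldl_cons, hA]
      have := ih chunks (gcur ++ [p]) (by simp)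
      rw [this, hT]
      simp
    · have hf : pvFlat gcur ≠ [] := fun hx => hg ((pvFlat_eq_nil_iff gcur).mp hx)
      have hp : pvFlat [p] = p ++ ['\n', '\n'] := by simp [pvFlat]
      have hA : pvStepA cs (chunks, pvFlat gcur) p
          = (chunks ++ [String.ofList (PySem.Chars.strip (pvFlat gcur))], pvFlat [p]) := by
        simp [pvStepA, PySem.Chars.len_eq, hc, hf, hp]
      have hT : pvTakeGroup cs (PySem.Chars.len (pvFlat gcur)) (p :: ps) = ([], p :: ps) := by
        simp [pvTakeGroup, PySem.Chars.len_eq, hc]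
      have hlen : PySem.Chars.len (pvFlat [p]) = PySem.Chars.len p + 2 := by
        simp [pvFlat, PySem.Chars.len_eq]
      rw [List.foldl_cons, hA]
      have := ih (chunks ++ [String.ofList (PySem.Chars.strip (pvFlat gcur))]) [p] (by simp)
      rw [this, hT, hlen, pvStrip_flat gcur hg, pvSplitGroups_cons]
      simp

-- the first paragraph starts the current chunk the same way in both branches of A
theorem pvStepA_empty (cs : Int) (chunks : List String) (p : List Char) :
    pvStepA cs (chunks, []) p = (chunks, p ++ ['\n', '\n']) := by
  simp [pvStepA]

-- the whole of A's loop + finish equals B's split-then-render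
theorem pvMain (cs : Int) (ps : List (List Char)) :
    pvFinishA (ps.foldl (pvStepA cs) ([], []))
      = (pvSplitGroups cs ps).map pvRender := by
  cases ps with
  | nil => simp [pvFinishA, pvSplitGroups_nil]
  | cons p ps =>
    rw [List.foldl_cons, pvStepA_empty,
        show p ++ ['\n', '\n'] = pvFlat [p] from (by simp [pvFlat])]
    have hlen : PySem.Chars.len (pvFlat [p]) = PySem.Chars.len p + 2 := by
      simp [pvFlat, PySem.Chars.len_eq]
    rw [pvLoopA_eq cs ps [] [p] (by simp), hlen, pvSplitGroups_cons]
    simp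

-- ===== VERDICT (by name: the statement is the Claim_ definition above) =====
theorem chunk_conversation_py_spec : Claim_equal_chunk_conversation_py := by
  intro text chunk_size _
  show chunk_conversation_py text chunk_size = chunk_conversation_py_alt text chunk_size
  exact pvMain chunk_size (PySem.Chars.splitOn text.toList ['\n', '\n'])
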